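-- pv_equiv track=rewrite | github.com/HarryMayne/rule_articulation_faithfulness | src/rules/decoy_rules.py | rule_14_decoy_1
-- ===== SOURCE A (Python) =====
-- def rule_14_decoy_1(s: str) -> bool:
--     """
--     The string is accepted when it has balanced double quotes and at least one quoted segment contains a space and is eight to eighteen characters long.
--     """
--     indices = [i for i, ch in enumerate(s) if ch == '"']
--     if len(indices) < 2 or len(indices) % 2 != 0:
--         return False
--     segments = [s[indices[i] + 1 : indices[i + 1]] for i in range(0, len(indices), 2)]
--     for segment in segments:
--         if ' ' in segment and 8 <= len(segment) <= 18:
--             return True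
--     return False
-- ===== SOURCE B (Python) =====
-- def rule_14_decoy_1(s: str) -> bool:
--     """Single pass with an in_quote flag and a segment buffer; defers the
--     answer to the end so an unbalanced trailing quote yields False."""
--     in_quote = False
--     buf = ""
--     found = False
--     for ch in s:
--         if ch == '"':
--             if in_quote:
--                 if ' ' in buf and 8 <= len(buf) <= 18:
--                     found = True
--                 in_quote = False
--             else:
--                 in_quote = True
--                 buf = ""
--         elif in_quote:
--             buf += ch
--     return found and not in_quote
-- ===== Notes on version B (the rewrite author's own statement) =====
-- stated objective: simpler
-- what changed: A collects all quote indices via enumerate, then builds every second inter-quote slice and scans them; B is a single pass over the characters with an in_quote flag, a segment buffer and a deferred found flag, returning found and not in_quote.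
import Mathlib
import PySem

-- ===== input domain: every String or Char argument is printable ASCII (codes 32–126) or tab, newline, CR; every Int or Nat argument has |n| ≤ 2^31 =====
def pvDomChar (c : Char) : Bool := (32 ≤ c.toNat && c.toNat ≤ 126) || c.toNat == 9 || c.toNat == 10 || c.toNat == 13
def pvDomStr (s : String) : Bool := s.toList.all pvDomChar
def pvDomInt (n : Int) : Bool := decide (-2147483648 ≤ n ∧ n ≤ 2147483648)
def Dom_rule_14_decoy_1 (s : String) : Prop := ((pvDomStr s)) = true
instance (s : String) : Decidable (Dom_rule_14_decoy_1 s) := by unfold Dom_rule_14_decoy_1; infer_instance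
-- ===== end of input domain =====

-- B replaces A's two-phase scheme (collect all quote indices, then slice out every
-- second gap) by a single pass with an in_quote flag, a segment buffer and a
-- deferred found flag (objective: simpler — one traversal, no index lists).

-- ===== PORT A =====
-- the Python condition `' ' in seg and 8 <= len(seg) <= 18`, shared verbatim by A and B
def pvQual (seg : List Char) : Bool :=
  PySem.Chars.isIn [' '] seg && decide (8 ≤ seg.length) && decide (seg.length ≤ 18)

def rule_14_decoy_1 (s : String) : Bool :=
  let cs := s.toList
  let indices : List Int :=
    (PySem.List.enumerate cs 0).filterMap (fun p => if p.2 = '"' then some p.1 else none)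
  if indices.length < 2 ∨ indices.length % 2 ≠ 0 then false
  else
    ((PySem.List.pyRange 0 (indices.length : Int) 2).map (fun i =>
        PySem.List.slice cs (some (PySem.List.pyGetD indices i 0 + 1))
          (some (PySem.List.pyGetD indices (i + 1) 0)))).any pvQual

-- ===== PORT B =====
def pvStep (st : Bool × List Char × Bool) (c : Char) : Bool × List Char × Bool :=
  if c = '"' then
    if st.1 then (false, st.2.1, st.2.2 || pvQual st.2.1)
    else (true, [], st.2.2)
  else if st.1 then (st.1, st.2.1 ++ [c], st.2.2)
  else st

def rule_14_decoy_1_alt (s : String) : Bool :=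
  let st := s.toList.foldl pvStep (false, [], false)
  st.2.2 && !st.1

-- ===== PRECONDITION & SPEC =====
def Spec_rule_14_decoy_1 (s : String) (out : Bool) : Prop := out = rule_14_decoy_1_alt s
instance (s : String) (out : Bool) : Decidable (Spec_rule_14_decoy_1 s out) := by unfold Spec_rule_14_decoy_1; infer_instance

-- ===== CLAIM (what is proved, stated in full; the proofs are below) =====
def Claim_equal_rule_14_decoy_1 : Prop := ∀ (s : String), Dom_rule_14_decoy_1 s → Spec_rule_14_decoy_1 s (rule_14_decoy_1 s)

-- ===== LEMMAS AND PROOFS =====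

-- result of B's fold started from an arbitrary state
def resSt (st : Bool × List Char × Bool) (cs : List Char) : Bool :=
  (cs.foldl pvStep st).2.2 && !(cs.foldl pvStep st).1

-- positions of '"' in a char list, as Nats
def qpos : List Char → List Nat
  | [] => []
  | c :: cs => if c = '"' then 0 :: (qpos cs).map (· + 1) else (qpos cs).map (· + 1)

-- split off the (quote-free) prefix before the first '"'
def splitQ : List Char → Option (List Char × List Char)
  | [] => none
  | c :: cs => if c = '"' then some ([], cs) else (splitQ cs).map (fun p => (c :: p.1, p.2))

lemma splitQ_none : ∀ cs : List Char, splitQ cs = none → '"' ∉ cs := by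
  intro cs h
  induction cs with
  | nil => simp
  | cons c cs ih =>
    by_cases hc : c = '"'
    · simp [splitQ, hc] at h
    · simp [splitQ, hc, Option.map_eq_none_iff] at h
      simp [Ne.symm hc, ih h]

lemma splitQ_some : ∀ cs a b : List Char, splitQ cs = some (a, b) →
    cs = a ++ '"' :: b ∧ '"' ∉ a := by
  intro cs
  induction cs with
  | nil => simp [splitQ]
  | cons c cs ih =>
    intro a b h
    by_cases hc : c = '"'
    · rw [splitQ, if_pos hc] at h
      simp only [Option.some.injEq, Prod.mk.injEq] at h
      obtain ⟨ha, hb⟩ := h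
      subst ha; subst hb; subst hc
      exact ⟨rfl, by simp⟩
    · rw [splitQ, if_neg hc] at h
      rcases hsp : splitQ cs with _ | p <;> rw [hsp] at h
      · simp at h
      · simp only [Option.map_some, Option.some.injEq, Prod.mk.injEq] at h
        obtain ⟨ha, hb⟩ := h
        obtain ⟨h3, h4⟩ := ih p.1 p.2 (by rw [hsp])
        subst ha; subst hb
        refine ⟨by simp [h3], ?_⟩
        simp [h4]
        exact fun he => hc he.symm

lemma qpos_eq_nil {cs : List Char} (h : '"' ∉ cs) : qpos cs = [] := by
  induction cs with
  | nil => rfl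
  | cons c cs ih =>
    simp at h
    simp [qpos, Ne.symm h.1, ih h.2]

lemma length_qpos (cs : List Char) : (qpos cs).length = cs.count '"' := by
  induction cs with
  | nil => rfl
  | cons c cs ih =>
    by_cases hc : c = '"' <;> simp [qpos, hc, ih, List.count_cons]

lemma qpos_append (xs ys : List Char) :
    qpos (xs ++ ys) = qpos xs ++ (qpos ys).map (· + xs.length) := by
  induction xs with
  | nil => simp [qpos]
  | cons c xs ih =>
    by_cases hc : c = '"' <;>
      simp [qpos, hc, ih, List.map_map, Function.comp_def] <;>
      (intro a _; omega)

lemma filterMap_enumerate_eq : ∀ (cs : List Char) (s : Int),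
    (PySem.List.enumerate cs s).filterMap (fun p => if p.2 = '"' then some p.1 else none)
      = (qpos cs).map (fun j => s + (j : Int)) := by
  intro cs
  induction cs with
  | nil => intro s; simp [PySem.List.enumerate, qpos]
  | cons c cs ih =>
    intro s
    rw [PySem.List.enumerate_cons]
    by_cases hc : c = '"' <;>
      simp [hc, ih (s + 1), qpos] <;>
      (rw [← List.map_eq_flatMap, ← List.map_eq_flatMap, List.map_map, List.map_map, List.map_map];
       apply List.map_congr_left; intro a _; simp [Function.comp]; ring)

def toIntL (l : List Nat) : List Int := l.map (fun j => Int.ofNat j)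

lemma length_toIntL (l : List Nat) : (toIntL l).length = l.length := by
  unfold toIntL; simp

lemma pyGetD_toIntL (l : List Nat) (n : Nat) (h : n < l.length) :
    PySem.List.pyGetD (toIntL l) ((n : Nat) : Int) 0 = ((l.getD n 0 : Nat) : Int) := by
  unfold toIntL
  rw [PySem.List.pyGetD_natCast, List.getD_eq_getElem _ _ (by simpa using h),
    List.getD_eq_getElem _ _ h]
  exact List.getElem_map _

lemma filterMap_enumerate_zero (cs : List Char) :
    (PySem.List.enumerate cs 0).filterMap (fun p => if p.2 = '"' then some p.1 else none)
      = toIntL (qpos cs) := by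
  rw [filterMap_enumerate_eq cs 0]
  unfold toIntL
  simp
  exact List.map_eq_flatMap.symm

-- range(0, 2q, 2) = [0, 2, ..., 2q-2]
lemma pyRange_two (q : Nat) :
    PySem.List.pyRange 0 ((2 * q : Nat) : Int) 2
      = (List.range q).map (fun k => ((2 * k : Nat) : Int)) := by
  rw [PySem.List.pyRange_of_pos 0 _ (by norm_num)]
  rcases Nat.eq_zero_or_pos q with hq | hq
  · simp [hq]
  · rw [if_pos (by push_cast; omega)]
    have h1 : ((((2 * q : Nat) : Int) - 0 + 2 - 1) / 2).toNat = q := by omega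
    rw [h1]
    exact List.map_congr_left (fun a _ => by push_cast; ring)

-- A in normal form: the k-th segment is drop/take around the k-th pair of quote positions
lemma A_norm (cs : List Char) :
    rule_14_decoy_1 (String.ofList cs)
      = (if (qpos cs).length < 2 ∨ (qpos cs).length % 2 ≠ 0 then false
         else ((List.range ((qpos cs).length / 2)).map (fun k =>
            (cs.drop ((qpos cs).getD (2 * k) 0 + 1)).take
              ((qpos cs).getD (2 * k + 1) 0 - ((qpos cs).getD (2 * k) 0 + 1)))).any pvQual) := by
  unfold rule_14_decoy_1
  simp only [String.toList_ofList]
  rw [filterMap_enumerate_zero cs, length_toIntL]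
  by_cases h : (qpos cs).length < 2 ∨ (qpos cs).length % 2 ≠ 0
  · rw [if_pos h, if_pos h]
  · rw [if_neg h, if_neg h]
    push_neg at h
    obtain ⟨h1, h2⟩ := h
    congr 1
    rw [show ((qpos cs).length : Int) = ((2 * ((qpos cs).length / 2) : Nat) : Int) from by
      push_cast; omega]
    rw [pyRange_two, List.map_map]
    apply List.map_congr_left
    intro k hk
    rw [List.mem_range] at hk
    have hb1 : 2 * k < (qpos cs).length := by omega
    have hb2 : 2 * k + 1 < (qpos cs).length := by omega
    simp only [Function.comp_apply]
    rw [pyGetD_toIntL _ _ hb1]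
    rw [show (((2 * k : Nat) : Int) + 1) = ((2 * k + 1 : Nat) : Int) from by push_cast; ring]
    rw [pyGetD_toIntL _ _ hb2]
    rw [show (((qpos cs).getD (2 * k) 0 : Nat) : Int) + 1
        = (((qpos cs).getD (2 * k) 0 + 1 : Nat) : Int) from by push_cast; ring]
    rw [PySem.List.slice_natCast]

lemma A_false {cs : List Char} (h : cs.count '"' < 2 ∨ cs.count '"' % 2 ≠ 0) :
    rule_14_decoy_1 (String.ofList cs) = false := by
  rw [A_norm, if_pos (by rw [length_qpos]; exact h)]

-- the quote positions of pre ++ '"' :: mid ++ '"' :: rest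
lemma qpos_decomp (pre mid rest : List Char) (hp : '"' ∉ pre) (hm : '"' ∉ mid) :
    qpos (pre ++ '"' :: (mid ++ '"' :: rest))
      = pre.length :: (pre.length + 1 + mid.length)
          :: (qpos rest).map (· + (pre.length + mid.length + 2)) := by
  rw [qpos_append, qpos_eq_nil hp]
  show (qpos ('"' :: (mid ++ '"' :: rest))).map (· + pre.length) = _
  rw [show qpos ('"' :: (mid ++ '"' :: rest)) = 0 :: (qpos (mid ++ '"' :: rest)).map (· + 1) from by
    simp [qpos]]
  rw [qpos_append, qpos_eq_nil hm]
  show ((0 : Nat) :: ((qpos ('"' :: rest)).map (· + mid.length)).map (· + 1)).map (· + pre.length) = _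
  rw [show qpos ('"' :: rest) = 0 :: (qpos rest).map (· + 1) from by simp [qpos]]
  simp only [List.map_cons, List.map_map]
  refine congrArg₂ _ (by omega) (congrArg₂ _ (by simp [Function.comp]; omega) ?_)
  exact List.map_congr_left (fun a _ => by simp [Function.comp]; omega)

-- the structural step of A
lemma A_step (pre mid rest : List Char) (hp : '"' ∉ pre) (hm : '"' ∉ mid) :
    rule_14_decoy_1 (String.ofList (pre ++ '"' :: (mid ++ '"' :: rest)))
      = ((pvQual mid && decide (rest.count '"' % 2 = 0))
          || rule_14_decoy_1 (String.ofList rest)) := by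
  rw [A_norm, A_norm, qpos_decomp pre mid rest hp hm]
  have hlen : (pre.length :: (pre.length + 1 + mid.length)
      :: (qpos rest).map (· + (pre.length + mid.length + 2))).length = rest.count '"' + 2 := by
    simp [length_qpos]
  rw [hlen, length_qpos rest]
  by_cases hpar : rest.count '"' % 2 = 0
  · rw [if_neg (by omega)]
    rw [show (rest.count '"' + 2) / 2 = rest.count '"' / 2 + 1 from by omega]
    rw [List.range_succ_eq_map, List.map_cons, List.any_cons, List.map_map]
    have hget0 : (pre.length :: (pre.length + 1 + mid.length)
        :: (qpos rest).map (· + (pre.length + mid.length + 2))).getD (2 * 0) 0 = pre.length := by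
      norm_num
    have hget1 : (pre.length :: (pre.length + 1 + mid.length)
        :: (qpos rest).map (· + (pre.length + mid.length + 2))).getD (2 * 0 + 1) 0
        = pre.length + 1 + mid.length := by norm_num
    rw [hget0, hget1]
    have hh : List.take (pre.length + 1 + mid.length - (pre.length + 1))
        (List.drop (pre.length + 1) (pre ++ '"' :: (mid ++ '"' :: rest))) = mid := by
      rw [show pre.length + 1 + mid.length - (pre.length + 1) = mid.length from by omega]
      rw [List.append_cons]
      rw [show pre.length + 1 = (pre ++ ['"']).length from by simp]
      rw [List.drop_left]
      exact List.take_left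
    rw [hh]
    rcases Nat.eq_zero_or_pos (rest.count '"') with h0 | hpos
    · rw [if_pos (by omega)]
      simp [h0]
    · rw [if_neg (by omega)]
      rw [show (pvQual mid && decide (rest.count '"' % 2 = 0)) = pvQual mid from by simp [hpar]]
      congr 1
      congr 1
      apply List.map_congr_left
      intro k hk
      rw [List.mem_range] at hk
      simp only [Function.comp_apply]
      rw [show 2 * Nat.succ k = 2 * k + 1 + 1 from by omega]
      simp only [List.getD_cons_succ]
      have hb1 : 2 * k < (qpos rest).length := by rw [length_qpos]; omega
      have hb2 : 2 * k + 1 < (qpos rest).length := by rw [length_qpos]; omega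
      have hm1 : ((qpos rest).map (· + (pre.length + mid.length + 2))).getD (2 * k) 0
          = (qpos rest).getD (2 * k) 0 + (pre.length + mid.length + 2) := by
        rw [List.getD_eq_getElem _ _ (by simpa using hb1), List.getElem_map,
          List.getD_eq_getElem _ _ hb1]
      have hm2 : ((qpos rest).map (· + (pre.length + mid.length + 2))).getD (2 * k + 1) 0
          = (qpos rest).getD (2 * k + 1) 0 + (pre.length + mid.length + 2) := by
        rw [List.getD_eq_getElem _ _ (by simpa using hb2), List.getElem_map,
          List.getD_eq_getElem _ _ hb2]
      rw [hm1, hm2]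
      rw [show (qpos rest).getD (2 * k) 0 + (pre.length + mid.length + 2) + 1
          = (pre ++ '"' :: (mid ++ ['"'])).length + ((qpos rest).getD (2 * k) 0 + 1) from by
        simp; omega]
      rw [show pre ++ '"' :: (mid ++ '"' :: rest) = (pre ++ '"' :: (mid ++ ['"'])) ++ rest from by
        simp]
      rw [List.drop_append]
      rw [show (qpos rest).getD (2 * k + 1) 0 + (pre.length + mid.length + 2)
          - ((pre ++ '"' :: (mid ++ ['"'])).length + ((qpos rest).getD (2 * k) 0 + 1))
          = (qpos rest).getD (2 * k + 1) 0 - ((qpos rest).getD (2 * k) 0 + 1) from by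
        simp; omega]
      rw [List.drop_eq_nil_of_le (Nat.le_add_right _ _), List.nil_append]
      rw [show (pre ++ '"' :: (mid ++ ['"'])).length + ((qpos rest).getD (2 * k) 0 + 1)
          - (pre ++ '"' :: (mid ++ ['"'])).length = (qpos rest).getD (2 * k) 0 + 1 from by omega]
  · rw [if_pos (by omega), if_pos (by omega)]
    simp [hpar]

-- B-side fold facts
lemma foldl_out (u : List Char) (buf : List Char) (f : Bool) (h : '"' ∉ u) :
    u.foldl pvStep (false, buf, f) = (false, buf, f) := by
  induction u with
  | nil => rfl
  | cons c u ih =>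
    simp at h
    simp [List.foldl_cons, pvStep, Ne.symm h.1]
    exact ih h.2

lemma foldl_in (u : List Char) (buf : List Char) (f : Bool) (h : '"' ∉ u) :
    u.foldl pvStep (true, buf, f) = (true, buf ++ u, f) := by
  induction u generalizing buf with
  | nil => simp
  | cons c u ih =>
    simp at h
    simp [List.foldl_cons, pvStep, Ne.symm h.1]
    rw [ih (buf ++ [c]) h.2]
    simp

lemma buf_irrel : ∀ (cs buf buf' : List Char) (f : Bool),
    resSt (false, buf, f) cs = resSt (false, buf', f) cs := by
  intro cs
  induction cs with
  | nil => intro buf buf' f; rfl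
  | cons c cs ih =>
    intro buf buf' f
    by_cases hc : c = '"' <;> simp [resSt, List.foldl_cons, pvStep, hc] <;>
      exact ih _ _ _

lemma found_lin : ∀ (cs : List Char) (inq : Bool) (buf : List Char) (f : Bool),
    resSt (inq, buf, f) cs
      = ((f && decide ((cs.count '"' + (if inq then 1 else 0)) % 2 = 0))
          || resSt (inq, buf, false) cs) := by
  intro cs
  induction cs with
  | nil =>
    intro inq buf f
    cases inq <;> cases f <;> simp [resSt]
  | cons c cs ih =>
    intro inq buf f
    by_cases hc : c = '"'
    · subst hc
      cases inq
      · have l1 : ∀ g : Bool, resSt (false, buf, g) ('"' :: cs) = resSt (true, [], g) cs := by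
          intro g; simp [resSt, List.foldl_cons, pvStep]
        rw [l1, l1, ih true [] f]
        congr 3
        simp [List.count_cons]
      · have l1 : ∀ g : Bool, resSt (true, buf, g) ('"' :: cs) = resSt (false, buf, g || pvQual buf) cs := by
          intro g; simp [resSt, List.foldl_cons, pvStep]
        rw [l1, l1, ih false buf (f || pvQual buf), ih false buf (false || pvQual buf)]
        cases f <;> cases hq : pvQual buf <;>
          simp [List.count_cons] <;> cases h2 : decide (cs.count '"' % 2 = 0) <;>
          simp_all <;> omega
    · cases inq
      · have l1 : ∀ g : Bool, resSt (false, buf, g) (c :: cs) = resSt (false, buf, g) cs := by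
          intro g; simp [resSt, List.foldl_cons, pvStep, hc]
        rw [l1, l1, ih false buf f]
        congr 3
        simp [List.count_cons, hc]
      · have l1 : ∀ g : Bool, resSt (true, buf, g) (c :: cs) = resSt (true, buf ++ [c], g) cs := by
          intro g; simp [resSt, List.foldl_cons, pvStep, hc]
        rw [l1, l1, ih true (buf ++ [c]) f]
        congr 3
        simp [List.count_cons, hc]

lemma B_step (pre mid rest : List Char) (hp : '"' ∉ pre) (hm : '"' ∉ mid) :
    resSt (false, [], false) (pre ++ '"' :: (mid ++ '"' :: rest))
      = ((pvQual mid && decide (rest.count '"' % 2 = 0)) || resSt (false, [], false) rest) := by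
  have h1 : (pre ++ '"' :: (mid ++ '"' :: rest)).foldl pvStep (false, [], false)
      = rest.foldl pvStep (false, mid, pvQual mid) := by
    rw [List.foldl_append, foldl_out pre [] false hp, List.foldl_cons]
    rw [show pvStep (false, [], false) '"' = (true, [], false) from by simp [pvStep]]
    rw [List.foldl_append, foldl_in mid [] false hm, List.foldl_cons]
    rw [show pvStep (true, [] ++ mid, false) '"' = (false, mid, pvQual mid) from by simp [pvStep]]
  have h2 : resSt (false, [], false) (pre ++ '"' :: (mid ++ '"' :: rest))
      = resSt (false, mid, pvQual mid) rest := by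
    simp [resSt, h1]
  rw [h2, found_lin rest false mid (pvQual mid), buf_irrel rest mid [] false]
  simp

lemma key : ∀ (n : Nat) (cs : List Char), cs.length ≤ n →
    rule_14_decoy_1 (String.ofList cs) = resSt (false, [], false) cs := by
  intro n
  induction n with
  | zero =>
    intro cs h
    have h0 : cs = [] := List.eq_nil_of_length_eq_zero (by omega)
    subst h0
    rw [A_false (by simp)]
    rfl
  | succ n ih =>
    intro cs hlen
    cases hsq : splitQ cs with
    | none =>
      have hnq := splitQ_none cs hsq
      rw [A_false (by simp [List.count_eq_zero_of_not_mem hnq])]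
      simp [resSt, foldl_out _ _ _ hnq]
    | some pv =>
      obtain ⟨hcs, hp⟩ := splitQ_some cs pv.1 pv.2 (by simpa using hsq)
      cases hsq2 : splitQ pv.2 with
      | none =>
        have hnq := splitQ_none pv.2 hsq2
        rw [hcs, A_false (by
          simp [List.count_append, List.count_cons,
            List.count_eq_zero_of_not_mem hp, List.count_eq_zero_of_not_mem hnq])]
        simp [resSt, List.foldl_append, foldl_out _ _ _ hp, List.foldl_cons, pvStep,
          foldl_in _ _ _ hnq]
      | some mr =>
        obtain ⟨hv, hm⟩ := splitQ_some pv.2 mr.1 mr.2 (by simpa using hsq2)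
        rw [hcs, hv, A_step _ _ _ hp hm, B_step _ _ _ hp hm]
        rw [ih mr.2 (by
          have h1 : cs.length = pv.1.length + 1 + (mr.1.length + 1 + mr.2.length) := by
            rw [hcs, hv]; simp; omega
          omega)]

-- ===== VERDICT (by name: the statement is the Claim_ definition above) =====
theorem rule_14_decoy_1_spec : Claim_equal_rule_14_decoy_1 := by
  intro s _
  unfold Spec_rule_14_decoy_1 rule_14_decoy_1_alt
  have h := key s.toList.length s.toList le_rfl
  rw [String.ofList_toList] at h
  rw [h]
  rfl
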